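-- pv_equiv track=rewrite | github.com/sharronesofer/visual_dm | backend/systems/tension/ml/prediction_engine.py | _determine_regional_trend
-- ===== SOURCE A (Python) =====
-- from typing import Dict, Any, List, Optional, Tuple
--
-- def _determine_regional_trend(poi_predictions: List[Dict[str, Any]]) -> str:
--     """Determine overall regional trend"""
--     rising_count = sum(1 for p in poi_predictions if p['trend'] in ['rising', 'critical'])
--     falling_count = sum(1 for p in poi_predictions if p['trend'] == 'falling')
--
--     if rising_count > falling_count:
--         return 'deteriorating'
--     elif falling_count > rising_count:
--         return 'improving'
--     else:
--         return 'stable'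
-- ===== SOURCE B (Python) =====
-- _WEIGHT = {'rising': 1, 'critical': 1, 'falling': -1}
--
-- def _determine_regional_trend(poi_predictions):
--     """Determine overall regional trend via a weight table: map each prediction
--     to a score, sum, and read the verdict off the sign of the sum."""
--     net = sum(_WEIGHT.get(p['trend'], 0) for p in poi_predictions)
--     if net == 0:
--         return 'stable'
--     return 'deteriorating' if net > 0 else 'improving'
-- ===== Notes on version B (the rewrite author's own statement) =====
-- stated objective: alternative
-- what changed: Replaces A's two separate counting passes with equality tests by a weight-table lookup: each prediction is mapped through a {trend: score} dict to +1/-1/0, the scores are summed in one pass, and the verdict is the sign of that sum.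
import Mathlib
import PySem

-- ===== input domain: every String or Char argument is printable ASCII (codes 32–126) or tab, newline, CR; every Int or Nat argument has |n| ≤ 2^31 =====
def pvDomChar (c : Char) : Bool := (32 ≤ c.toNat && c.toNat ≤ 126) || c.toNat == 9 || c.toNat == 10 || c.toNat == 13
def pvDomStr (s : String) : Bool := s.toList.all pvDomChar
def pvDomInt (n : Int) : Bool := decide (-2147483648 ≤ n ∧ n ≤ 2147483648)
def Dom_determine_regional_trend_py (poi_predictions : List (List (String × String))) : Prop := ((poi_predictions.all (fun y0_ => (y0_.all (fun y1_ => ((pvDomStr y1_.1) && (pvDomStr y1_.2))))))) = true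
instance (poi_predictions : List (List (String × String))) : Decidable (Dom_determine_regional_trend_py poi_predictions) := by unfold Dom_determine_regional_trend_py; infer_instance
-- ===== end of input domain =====

-- B replaces A's two counting passes by a weight-table (trend ↦ ±1/0) map-sum whose sign is the verdict (alternative decomposition, same cost).

-- ===== PORT A =====
-- p['trend'] : first matching value; Pre_ guarantees the key is present (KeyError otherwise)
def pvTrend (p : List (String × String)) : String := (List.lookup "trend" p).getD ""

def determine_regional_trend_py (poi_predictions : List (List (String × String))) : String :=
  let rising_count : Int :=
    poi_predictions.foldl (fun acc p => if pvTrend p = "rising" ∨ pvTrend p = "critical" then acc + 1 else acc) 0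
  let falling_count : Int :=
    poi_predictions.foldl (fun acc p => if pvTrend p = "falling" then acc + 1 else acc) 0
  if rising_count > falling_count then "deteriorating"
  else if falling_count > rising_count then "improving"
  else "stable"

-- ===== PORT B =====
-- the module-level weight table _WEIGHT of Source B
def pvWeight : PySem.Dict String Int :=
  PySem.Dict.ofList [("rising", 1), ("critical", 1), ("falling", -1)]

def determine_regional_trend_py_alt (poi_predictions : List (List (String × String))) : String :=
  let net : Int := (poi_predictions.map (fun p => pvWeight.getD (pvTrend p) 0)).sum
  if net = 0 then "stable"
  else if net > 0 then "deteriorating"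
  else "improving"

-- ===== PRECONDITION & SPEC =====
-- Pre_ excludes dicts lacking the 'trend' key, on which Python A (and B) raise KeyError.
def Pre_determine_regional_trend_py (poi_predictions : List (List (String × String))) : Prop :=
  ∀ p ∈ poi_predictions, (List.lookup "trend" p).isSome
instance (poi_predictions : List (List (String × String))) : Decidable (Pre_determine_regional_trend_py poi_predictions) := by unfold Pre_determine_regional_trend_py; infer_instance
def pvWitness_determine_regional_trend_py : (List (List (String × String))) := [[("trend", "rising")], [("trend", "stable")]]

def Spec_determine_regional_trend_py (poi_predictions : List (List (String × String))) (out : String) : Prop := out = determine_regional_trend_py_alt poi_predictions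
instance (poi_predictions : List (List (String × String))) (out : String) : Decidable (Spec_determine_regional_trend_py poi_predictions out) := by unfold Spec_determine_regional_trend_py; infer_instance

-- ===== CLAIM (what is proved, stated in full; the proofs are below) =====
def Claim_equal_determine_regional_trend_py : Prop := ∀ (poi_predictions : List (List (String × String))), Dom_determine_regional_trend_py poi_predictions → Pre_determine_regional_trend_py poi_predictions → Spec_determine_regional_trend_py poi_predictions (determine_regional_trend_py poi_predictions)

-- ===== LEMMAS AND PROOFS =====
-- The weight table, characterised pointwise.
theorem pv_weight_val (t : String) :
    pvWeight.getD t 0 =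
      if t = "rising" ∨ t = "critical" then 1 else if t = "falling" then -1 else 0 := by
  have h : pvWeight = PySem.Dict.mk [("rising", 1), ("critical", 1), ("falling", -1)] := by decide
  by_cases h1 : t = "rising"
  · subst h1; decide
  · by_cases h2 : t = "critical"
    · subst h2; decide
    · by_cases h3 : t = "falling"
      · subst h3; decide
      · simp only [h1, h2, h3, or_self, if_false]
        rw [h]
        simp [PySem.Dict.getD, PySem.Dict.get?, Ne.symm h1, Ne.symm h2, Ne.symm h3]

-- B's weighted sum equals A's rising count minus A's falling count (any starting accumulators).
theorem pv_sum_eq_counts (l : List (List (String × String))) :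
    ∀ (r f : Int),
    l.foldl (fun acc p => if pvTrend p = "rising" ∨ pvTrend p = "critical" then acc + 1 else acc) r
      - l.foldl (fun acc p => if pvTrend p = "falling" then acc + 1 else acc) f
      = (l.map (fun p => pvWeight.getD (pvTrend p) 0)).sum + (r - f) := by
  induction l with
  | nil => intro r f; simp
  | cons p l ih =>
    intro r f
    simp only [List.foldl_cons, List.map_cons, List.sum_cons, pv_weight_val (pvTrend p)]
    by_cases h1 : pvTrend p = "rising" ∨ pvTrend p = "critical"
    · have h2 : ¬ pvTrend p = "falling" := by rcases h1 with h1 | h1 <;> simp [h1]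
      simp only [if_pos h1, if_neg h2]
      linarith [ih (r + 1) f]
    · by_cases h2 : pvTrend p = "falling"
      · simp only [if_neg h1, if_pos h2]
        linarith [ih r (f + 1)]
      · simp only [if_neg h1, if_neg h2]
        linarith [ih r f]

-- ===== VERDICT (by name: the statement is the Claim_ definition above) =====
theorem determine_regional_trend_py_spec : Claim_equal_determine_regional_trend_py := by
  intro l _ _
  unfold Spec_determine_regional_trend_py determine_regional_trend_py determine_regional_trend_py_alt
  set r := l.foldl (fun acc p => if pvTrend p = "rising" ∨ pvTrend p = "critical" then acc + 1 else acc) (0:Int) with hr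
  set f := l.foldl (fun acc p => if pvTrend p = "falling" then acc + 1 else acc) (0:Int) with hf
  have hnet : (l.map (fun p => pvWeight.getD (pvTrend p) 0)).sum = r - f := by
    have := pv_sum_eq_counts l 0 0
    rw [← hr, ← hf] at this; omega
  rw [hnet]
  by_cases hrf : r > f
  · simp [hrf, show ¬ (r - f = 0) by omega]
  · by_cases hfr : f > r
    · simp [hrf, hfr, show ¬ (r - f = 0) by omega]
    · simp [hrf, hfr, show r - f = 0 by omega]
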